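-- pv_equiv track=rewrite | github.com/pepze21/Coding_practice_Programers | diseukeu_keonteurolreo.py | solution
-- ===== SOURCE A (Python) =====
-- from queue import PriorityQueue
--
-- def solution(jobs):
--     jobs = sorted(jobs, key=lambda x: x[0])
--     pq = PriorityQueue()
--     fin_time = 0
--     sum_time = 0
--     i = 0
--     # pq는 비어있든 안 비어있든 True, pq.empty()는 비어있을 때만 True
--     while ((i < len(jobs)) or (not pq.empty())):
--         if ((pq.empty()) and (fin_time < jobs[i][0])):
--             fin_time = jobs[i][0]
--         while ((i < len(jobs)) and (jobs[i][0] <= fin_time)):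
--             pq.put((jobs[i][1], jobs[i])) # 이 tuple element는 jobs[i][1]을 기준으로 오름차순 정렬(최소 힙)
--             i += 1
--         if (not pq.empty()):
--             next_job = pq.get()[1]
--             fin_time += next_job[1]
--             sum_time += (fin_time - next_job[0])
--     return sum_time // len(jobs)
-- ===== SOURCE B (Python) =====
-- def solution(jobs):
--     order = sorted(jobs, key=lambda j: j[0])
--     n = len(order)
--     pool = []
--     i = 0
--     fin = 0
--     total = 0
--     while i < n or pool:
--         if not pool and fin < order[i][0]:
--             fin = order[i][0]
--         while i < n and order[i][0] <= fin:
--             pool.append(order[i])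
--             i += 1
--         # pick the shortest job in the pool (deterministic tie-break on the job itself)
--         best = 0
--         for k in range(1, len(pool)):
--             if (pool[k][1], pool[k]) < (pool[best][1], pool[best]):
--                 best = k
--         job = pool.pop(best)
--         fin += job[1]
--         total += fin - job[0]
--     return total // n
-- ===== Notes on version B (the rewrite author's own statement) =====
-- stated objective: alternative
-- what changed: Replaces A's PriorityQueue (binary heap) of (duration, job) tuples with a plain pool list plus a linear scan for the index of the shortest waiting job, popped by index; the admission and clock-advance logic is kept but no heap is maintained.
import Mathlib
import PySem

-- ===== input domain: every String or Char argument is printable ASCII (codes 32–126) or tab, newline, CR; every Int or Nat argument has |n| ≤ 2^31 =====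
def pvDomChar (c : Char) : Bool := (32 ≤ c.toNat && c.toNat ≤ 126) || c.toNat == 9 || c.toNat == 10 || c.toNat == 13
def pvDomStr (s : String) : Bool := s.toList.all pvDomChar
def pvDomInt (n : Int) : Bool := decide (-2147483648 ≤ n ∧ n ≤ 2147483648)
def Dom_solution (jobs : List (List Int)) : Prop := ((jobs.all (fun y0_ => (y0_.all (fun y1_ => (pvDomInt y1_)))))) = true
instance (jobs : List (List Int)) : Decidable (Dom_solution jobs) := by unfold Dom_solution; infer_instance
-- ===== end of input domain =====

-- B replaces A's binary heap (PriorityQueue) by a plain pool list scanned linearly for the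
-- shortest waiting job (same deterministic (duration, job) tie-break); an alternative data
-- structure, not claimed faster.

-- Shared helper: Python's '<' on lists of ints (lexicographic) and on (int, list) tuples,
-- exactly as PriorityQueue/heapq compares A's (duration, job) entries and B compares its keys.
def pvListLt : List Int → List Int → Bool
  | _, [] => false
  | [], _ :: _ => true
  | a :: as, b :: bs => a < b || (a == b && pvListLt as bs)

def pvPairLt (p q : Int × List Int) : Bool :=
  p.1 < q.1 || (p.1 == q.1 && pvListLt p.2 q.2)

-- ===== PORT A =====
-- PriorityQueue modeled as a list kept ascending under pvPairLt: put = ordered insert, get = head.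
def pvPqPut (x : Int × List Int) : List (Int × List Int) → List (Int × List Int)
  | [] => [x]
  | y :: ys => if pvPairLt x y then x :: y :: ys else y :: pvPqPut x ys

-- inner loop of A: while i < len(jobs) and jobs[i][0] <= fin_time: pq.put((jobs[i][1], jobs[i])); i += 1
-- (structural recursion on a fuel counter; fuel = sj.length always suffices)
def pvAdmitA (sj : List (List Int)) (fin : Int) :
    Nat → Nat → List (Int × List Int) → Nat × List (Int × List Int)
  | 0, i, pq => (i, pq)
  | fuel + 1, i, pq =>
    if h : i < sj.length then
      if PySem.List.pyGetD sj[i] 0 0 ≤ fin then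
        pvAdmitA sj fin fuel (i + 1) (pvPqPut (PySem.List.pyGetD sj[i] 1 0, sj[i]) pq)
      else (i, pq)
    else (i, pq)

-- outer loop of A: while i < len(jobs) or not pq.empty(): …
-- (fuel = len(jobs) + 1 suffices: every iteration of Python's loop pops exactly one job;
--  the branch where the queue is empty after admission returns the accumulator — it is
--  unreachable from solution's call, where Python's while would simply re-test the guard)
def pvLoopA (sj : List (List Int)) :
    Nat → List (Int × List Int) → Nat → Int → Int → Int
  | 0, _pq, _i, _fin, sum => sum
  | fuel + 1, pq, i, fin, sum =>
    if i < sj.length ∨ pq ≠ [] then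
      let fin1 := if pq = [] ∧ fin < PySem.List.pyGetD (sj.getD i []) 0 0 then
                    PySem.List.pyGetD (sj.getD i []) 0 0 else fin
      match pvAdmitA sj fin1 sj.length i pq with
      | (_, []) => sum
      | (i', p :: rest) =>
        let fin2 := fin1 + PySem.List.pyGetD p.2 1 0
        pvLoopA sj fuel rest i' fin2 (sum + (fin2 - PySem.List.pyGetD p.2 0 0))
    else sum

def solution (jobs : List (List Int)) : Int :=
  let sj := PySem.List.sorted jobs (fun x => PySem.List.pyGetD x 0 0)
  PySem.Int.floordiv (pvLoopA sj (jobs.length + 1) [] 0 0 0) (jobs.length : Int)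

-- ===== PORT B =====
def pvTag (j : List Int) : Int × List Int := (PySem.List.pyGetD j 1 0, j)

-- B's comparison key (pool[k][1], pool[k]) < (pool[best][1], pool[best])
def pvKeyLt (a b : List Int) : Bool := pvPairLt (pvTag a) (pvTag b)

-- B's admission: while i < n and order[i][0] <= fin: pool.append(order[i]); i += 1
def pvAdmitB (sj : List (List Int)) (fin : Int) :
    Nat → Nat → List (List Int) → Nat × List (List Int)
  | 0, i, pool => (i, pool)
  | fuel + 1, i, pool =>
    if h : i < sj.length then
      if PySem.List.pyGetD sj[i] 0 0 ≤ fin then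
        pvAdmitB sj fin fuel (i + 1) (pool ++ [sj[i]])
      else (i, pool)
    else (i, pool)

-- B's linear scan: for k in range(1, len(pool)): if key(pool[k]) < key(pool[best]): best = k
-- (fuel = pool.length suffices)
def pvBestIdx (pool : List (List Int)) : Nat → Nat → Nat → Nat
  | 0, best, _k => best
  | fuel + 1, best, k =>
    if k < pool.length then
      pvBestIdx pool fuel (if pvKeyLt (pool.getD k []) (pool.getD best []) then k else best) (k + 1)
    else best

-- outer loop of B (the none branch of pop? is unreachable from solution_alt's call:
--  the pool is never empty when a job is picked)
def pvLoopB (sj : List (List Int)) :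
    Nat → List (List Int) → Nat → Int → Int → Int
  | 0, _pool, _i, _fin, total => total
  | fuel + 1, pool, i, fin, total =>
    if i < sj.length ∨ pool ≠ [] then
      let fin1 := if pool = [] ∧ fin < PySem.List.pyGetD (sj.getD i []) 0 0 then
                    PySem.List.pyGetD (sj.getD i []) 0 0 else fin
      match pvAdmitB sj fin1 sj.length i pool with
      | (i', pool') =>
        match PySem.List.pop? pool' ((pvBestIdx pool' pool'.length 0 1 : Nat) : Int) with
        | none => total
        | some (job, rest) =>
          let fin2 := fin1 + PySem.List.pyGetD job 1 0
          pvLoopB sj fuel rest i' fin2 (total + (fin2 - PySem.List.pyGetD job 0 0))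
    else total

def solution_alt (jobs : List (List Int)) : Int :=
  let sj := PySem.List.sorted jobs (fun x => PySem.List.pyGetD x 0 0)
  PySem.Int.floordiv (pvLoopB sj (sj.length + 1) [] 0 0 0) (sj.length : Int)

-- ===== PRECONDITION & SPEC =====
-- Pre_ excludes exactly the inputs on which Python A raises: an empty jobs list
-- (ZeroDivisionError in sum_time // len(jobs)) and inner lists shorter than 2 (IndexError).
def Pre_solution (jobs : List (List Int)) : Prop :=
  jobs ≠ [] ∧ ∀ j ∈ jobs, 2 ≤ j.length
instance (jobs : List (List Int)) : Decidable (Pre_solution jobs) := by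
  unfold Pre_solution; infer_instance

def pvWitness_solution : List (List Int) := [[0, 3], [1, 9], [2, 6]]

def Spec_solution (jobs : List (List Int)) (out : Int) : Prop := out = solution_alt jobs
instance (jobs : List (List Int)) (out : Int) : Decidable (Spec_solution jobs out) := by
  unfold Spec_solution; infer_instance

-- ===== CLAIM (what is proved, stated in full; the proofs are below) =====
def Claim_equal_solution : Prop :=
  ∀ (jobs : List (List Int)), Dom_solution jobs → Pre_solution jobs →
    Spec_solution jobs (solution jobs)

-- ===== LEMMAS AND PROOFS =====

-- strict-order facts for pvListLt / pvPairLt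
theorem pvListLt_irrefl (a : List Int) : pvListLt a a = false := by
  induction a with
  | nil => rfl
  | cons x xs ih => simp [pvListLt, ih]

theorem pvListLt_trans {a b c : List Int} (h1 : pvListLt a b = true) (h2 : pvListLt b c = true) :
    pvListLt a c = true := by
  induction a generalizing b c with
  | nil =>
    cases b with
    | nil => simp [pvListLt] at h1
    | cons y ys => cases c with
      | nil => simp [pvListLt] at h2
      | cons z zs => simp [pvListLt]
  | cons x xs ih =>
    cases b with
    | nil => simp [pvListLt] at h1
    | cons y ys =>
      cases c with
      | nil => simp [pvListLt] at h2
      | cons z zs =>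
        simp [pvListLt] at h1 h2 ⊢
        rcases h1 with h1 | ⟨hxy, h1⟩ <;> rcases h2 with h2 | ⟨hyz, h2⟩
        · left; omega
        · left; omega
        · left; omega
        · right; exact ⟨by omega, ih h1 h2⟩

theorem pvListLt_eq_of_not (a b : List Int) (h1 : pvListLt a b = false)
    (h2 : pvListLt b a = false) : a = b := by
  induction a generalizing b with
  | nil => cases b with
    | nil => rfl
    | cons y ys => simp [pvListLt] at h1
  | cons x xs ih =>
    cases b with
    | nil => simp [pvListLt] at h2
    | cons y ys =>
      simp only [pvListLt, Bool.or_eq_false_iff, Bool.and_eq_false_iff,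
        decide_eq_false_iff_not, beq_eq_false_iff_ne, ne_eq] at h1 h2
      obtain ⟨hxy1, hr1⟩ := h1
      obtain ⟨hxy2, hr2⟩ := h2
      have hxy : x = y := by omega
      subst hxy
      have e1 : pvListLt xs ys = false := by
        rcases hr1 with h | h
        · exact absurd rfl h
        · exact h
      have e2 : pvListLt ys xs = false := by
        rcases hr2 with h | h
        · exact absurd rfl h
        · exact h
      rw [ih ys e1 e2]

theorem pvPairLt_irrefl (p : Int × List Int) : pvPairLt p p = false := by
  simp [pvPairLt, pvListLt_irrefl]

theorem pvPairLt_trans {p q r : Int × List Int} (h1 : pvPairLt p q = true)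
    (h2 : pvPairLt q r = true) : pvPairLt p r = true := by
  simp [pvPairLt] at h1 h2 ⊢
  rcases h1 with h1 | ⟨e1, h1⟩ <;> rcases h2 with h2 | ⟨e2, h2⟩
  · left; omega
  · left; omega
  · left; omega
  · right; exact ⟨by omega, pvListLt_trans h1 h2⟩

theorem pvPairLt_eq_of_not {p q : Int × List Int} (h1 : pvPairLt p q = false)
    (h2 : pvPairLt q p = false) : p = q := by
  simp [pvPairLt] at h1 h2
  obtain ⟨ha1, hb1⟩ := h1
  obtain ⟨ha2, hb2⟩ := h2
  have he : p.1 = q.1 := by omega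
  have := pvListLt_eq_of_not p.2 q.2 (hb1 he) (hb2 he.symm)
  exact Prod.ext he this

-- sortedness predicate for the modeled queue
def PqSorted (pq : List (Int × List Int)) : Prop :=
  List.Pairwise (fun a b => pvPairLt b a = false) pq

theorem pvPqPut_perm (x : Int × List Int) (l : List (Int × List Int)) :
    (pvPqPut x l).Perm (x :: l) := by
  induction l with
  | nil => exact List.Perm.refl _
  | cons y ys ih =>
    simp only [pvPqPut]
    split
    · exact List.Perm.refl _
    · exact (ih.cons y).trans (List.Perm.swap x y ys)

theorem pvPqPut_sorted (x : Int × List Int) (l : List (Int × List Int)) (h : PqSorted l) :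
    PqSorted (pvPqPut x l) := by
  induction l with
  | nil => simp [pvPqPut, PqSorted]
  | cons y ys ih =>
    simp only [pvPqPut]
    rcases List.pairwise_cons.mp h with ⟨hy, hys⟩
    split
    · rename_i hxy
      refine List.pairwise_cons.mpr ⟨?_, h⟩
      intro z hz
      rcases List.mem_cons.mp hz with rfl | hz
      · cases hzx : pvPairLt z x
        · rfl
        · exact absurd (pvPairLt_trans hzx hxy) (by simp [pvPairLt_irrefl])
      · cases hzx : pvPairLt z x
        · rfl
        · exact absurd (pvPairLt_trans hzx hxy) (by simp [hy z hz])
    · rename_i hxy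
      refine List.pairwise_cons.mpr ⟨?_, ih hys⟩
      intro z hz
      have hz' := (pvPqPut_perm x ys).mem_iff.mp hz
      rcases List.mem_cons.mp hz' with rfl | hz'
      · simpa using hxy
      · exact hy z hz'

-- the head of the sorted queue is minimal
theorem pq_head_min (p : Int × List Int) (rest : List (Int × List Int))
    (h : PqSorted (p :: rest)) : ∀ q ∈ p :: rest, pvPairLt q p = false := by
  intro q hq
  rcases List.mem_cons.mp hq with rfl | hq
  · exact pvPairLt_irrefl q
  · exact (List.pairwise_cons.mp h).1 q hq

-- B's scan returns an index of a pool element no other element is strictly below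
theorem pvBestIdx_min (pool : List (List Int)) :
    ∀ fuel k best, pool.length ≤ k + fuel → best < pool.length →
      (∀ m, m < k → m < pool.length →
        pvKeyLt (pool.getD m []) (pool.getD best []) = false) →
      pvBestIdx pool fuel best k < pool.length ∧
        ∀ m, m < pool.length →
          pvKeyLt (pool.getD m []) (pool.getD (pvBestIdx pool fuel best k) []) = false := by
  intro fuel
  induction fuel with
  | zero =>
    intro k best hfuel hb hmin
    refine ⟨hb, ?_⟩
    intro m hmlen
    exact hmin m (by omega) hmlen
  | succ fuel ih =>
    intro k best hfuel hb hmin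
    rw [pvBestIdx]
    split
    · rename_i hk
      apply ih
      · omega
      · split
        · exact hk
        · exact hb
      · intro m hm hmlen
        split
        · rename_i hlt
          by_cases hmk : m = k
          · subst hmk; exact pvPairLt_irrefl _
          · cases hc : pvKeyLt (pool.getD m []) (pool.getD k [])
            · rfl
            · exact absurd (pvPairLt_trans hc hlt)
                (by simp [pvKeyLt] at hmin ⊢; simp [hmin m (by omega) hmlen])
        · rename_i hnlt
          by_cases hmk : m = k
          · subst hmk; simpa using hnlt
          · exact hmin m (by omega) hmlen
    · rename_i hnk
      refine ⟨hb, ?_⟩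
      intro m hmlen
      exact hmin m (by omega) hmlen

-- admission preserves the simulation invariant and advances the index identically
theorem pvAdmit_rel (sj : List (List Int)) (fin : Int) :
    ∀ fuel i pq, ∀ pool : List (List Int), PqSorted pq → pq.Perm (pool.map pvTag) →
      (pvAdmitA sj fin fuel i pq).1 = (pvAdmitB sj fin fuel i pool).1 ∧
      PqSorted (pvAdmitA sj fin fuel i pq).2 ∧
      (pvAdmitA sj fin fuel i pq).2.Perm ((pvAdmitB sj fin fuel i pool).2.map pvTag) := by
  intro fuel
  induction fuel with
  | zero =>
    intro i pq pool hs hp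
    exact ⟨rfl, hs, hp⟩
  | succ fuel ih =>
    intro i pq pool hs hp
    rw [pvAdmitA, pvAdmitB]
    by_cases hlt : i < sj.length
    · rw [dif_pos hlt, dif_pos hlt]
      by_cases hle : PySem.List.pyGetD sj[i] 0 0 ≤ fin
      · rw [if_pos hle, if_pos hle]
        apply ih
        · exact pvPqPut_sorted _ _ hs
        · refine ((pvPqPut_perm _ pq).trans (hp.cons _)).trans ?_
          simp only [List.map_append, List.map_cons, List.map_nil]
          exact (List.perm_append_singleton _ _).symm
      · rw [if_neg hle, if_neg hle]
        exact ⟨rfl, hs, hp⟩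
    · rw [dif_neg hlt, dif_neg hlt]
      exact ⟨rfl, hs, hp⟩

-- the pop step: A's heap minimum is exactly the pool element B's scan selects
theorem pop_rel (pq : List (Int × List Int)) (pool : List (List Int))
    (hs : PqSorted pq) (hp : pq.Perm (pool.map pvTag)) (hne : pool ≠ []) :
    ∃ rest, pvBestIdx pool pool.length 0 1 < pool.length ∧
      pq = pvTag (pool.getD (pvBestIdx pool pool.length 0 1) []) :: rest ∧
      rest.Perm ((pool.eraseIdx (pvBestIdx pool pool.length 0 1)).map pvTag) := by
  have hpoollen : 0 < pool.length := List.length_pos_iff.mpr hne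
  obtain ⟨hrlen, hrmin⟩ := pvBestIdx_min pool pool.length 1 0 (by omega) hpoollen
    (by intro m hm hmlen; interval_cases m; exact pvPairLt_irrefl _)
  set r := pvBestIdx pool pool.length 0 1 with hr
  have hget : pool.getD r [] = pool[r] := List.getD_eq_getElem pool [] hrlen
  cases pq with
  | nil =>
    exfalso
    have := hp.length_eq
    simp at this
    omega
  | cons p rest =>
    have hpe : p = pvTag pool[r] := by
      have htag_mem : pvTag pool[r] ∈ (p :: rest) :=
        hp.symm.subset (List.mem_map_of_mem (pool.getElem_mem hrlen))
      have h1 : pvPairLt (pvTag pool[r]) p = false :=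
        pq_head_min p rest hs _ htag_mem
      have hmem : p ∈ pool.map pvTag := hp.subset List.mem_cons_self
      obtain ⟨j, hj, hje⟩ := List.mem_map.mp hmem
      obtain ⟨m, hm, rfl⟩ := List.mem_iff_getElem.mp hj
      have h2 : pvPairLt (pvTag pool[m]) (pvTag pool[r]) = false := by
        have := hrmin m hm
        rw [hget, List.getD_eq_getElem pool [] hm] at this
        exact this
      rw [← hje] at h1 ⊢
      exact pvPairLt_eq_of_not h2 h1
    refine ⟨rest, hrlen, by rw [hget, hpe], ?_⟩
    have hperm2 : (pool.map pvTag).Perm (pvTag pool[r] :: (pool.eraseIdx r).map pvTag) := by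
      have := (List.getElem_cons_eraseIdx_perm hrlen).symm
      simpa using this.map pvTag
    have h3 := hp.trans hperm2
    rw [hpe] at h3
    exact h3.cons_inv

-- main simulation: at equal fuel the two loops agree whenever the queue mirrors the pool
theorem loop_rel (sj : List (List Int)) :
    ∀ fuel pq pool i fin s,
      PqSorted pq → pq.Perm (pool.map pvTag) →
      pvLoopA sj fuel pq i fin s = pvLoopB sj fuel pool i fin s := by
  intro fuel
  induction fuel with
  | zero => intro pq pool i fin s _ _; rfl
  | succ fuel ihN =>
    intro pq pool i fin s hs hp
    have hpe : (pq = []) ↔ (pool = []) := by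
      constructor
      · intro h; subst h
        exact List.map_eq_nil_iff.mp (List.perm_nil.mp hp.symm)
      · intro h; subst h
        exact List.perm_nil.mp (by simpa using hp)
    rw [pvLoopA, pvLoopB]
    by_cases hg : i < sj.length ∨ pq ≠ []
    · have hgB : i < sj.length ∨ pool ≠ [] := by
        rcases hg with h | h
        · exact Or.inl h
        · exact Or.inr fun he => h (hpe.mpr he)
      rw [if_pos hg, if_pos hgB]
      have hc : (pool = []) = (pq = []) := by rw [eq_iff_iff]; exact hpe.symm
      simp only [hc]
      generalize (if pq = [] ∧ fin < PySem.List.pyGetD (sj.getD i []) 0 0 then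
        PySem.List.pyGetD (sj.getD i []) 0 0 else fin) = F
      obtain ⟨hi12, hs2, hp2⟩ := pvAdmit_rel sj F sj.length i pq pool hs hp
      rcases hAe : pvAdmitA sj F sj.length i pq with ⟨iA, pqA⟩
      rcases hBe : pvAdmitB sj F sj.length i pool with ⟨iB, poolB⟩
      rw [hAe] at hi12 hs2 hp2
      rw [hBe] at hi12 hp2
      simp only at hi12 hs2 hp2
      subst hi12
      cases pqA with
      | nil =>
        have hpoolB : poolB = [] := List.map_eq_nil_iff.mp (List.perm_nil.mp hp2.symm)
        subst hpoolB
        simp [pvBestIdx, PySem.List.pop?]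
      | cons p restA =>
        have hneB : poolB ≠ [] := by
          intro h
          subst h
          simp [List.perm_nil] at hp2
        obtain ⟨rest', hrlen, heq, hperm⟩ := pop_rel (p :: restA) poolB hs2 hp2 hneB
        injection heq with hpeq hreq
        rw [PySem.List.pop?_natCast _ _ hrlen]
        simp only []
        have hgetr := List.getD_eq_getElem poolB ([] : List Int) hrlen
        rw [hgetr] at hpeq
        subst hpeq
        subst hreq
        simp only [pvTag]
        apply ihN
        · exact (List.pairwise_cons.mp hs2).2
        · exact hperm
    · have hgB : ¬ (i < sj.length ∨ pool ≠ []) := by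
        rcases not_or.mp hg with ⟨h1, h2⟩
        simp only [ne_eq, not_not] at h2
        exact not_or.mpr ⟨h1, by simp [← hpe, h2]⟩
      rw [if_neg hg, if_neg hgB]

-- ===== VERDICT (by name: the statement is the Claim_ definition above) =====
theorem solution_spec : Claim_equal_solution := by
  intro jobs _ _
  unfold Spec_solution solution solution_alt
  simp only []
  rw [PySem.List.length_sorted]
  congr 1
  exact loop_rel _ (jobs.length + 1) [] [] 0 0 0 List.Pairwise.nil (by simp)
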